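-- pv_equiv track=rewrite | github.com/AmirHosseinRezaaie/DS_Project | python/src/parser.py | normalize_signs
-- ===== SOURCE A (Python) =====
-- def normalize_signs(expr: str) -> str:
--     """Simplify consecutive signs: +++5 → +5, ---7 → -7"""
--     result = []
--     i = 0
--     while i < len(expr):
--         if expr[i] in '+-':
--             # Collect consecutive signs
--             signs = []
--             while i < len(expr) and expr[i] in '+-':
--                 signs.append(expr[i])
--                 i += 1
--             # Count negatives
--             neg_count = signs.count('-')
--             result.append('-' if neg_count % 2 == 1 else '+')
--         else:
--             result.append(expr[i])
--             i += 1
--     return ''.join(result)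
-- ===== SOURCE B (Python) =====
-- def normalize_signs(expr: str) -> str:
--     """Single pass with a pending sign-parity flag instead of a nested collect loop."""
--     out = []
--     neg = None  # None: not in a sign run; else True iff the pending run has odd '-' count
--     for c in expr:
--         if c == '+' or c == '-':
--             neg = (c == '-') if neg is None else (neg != (c == '-'))
--         else:
--             if neg is not None:
--                 out.append('-' if neg else '+')
--                 neg = None
--             out.append(c)
--     if neg is not None:
--         out.append('-' if neg else '+')
--     return ''.join(out)
-- ===== Notes on version B (the rewrite author's own statement) =====
-- stated objective: alternative
-- what changed: Replaced the nested while-loops (collect a sign run into a list, then count '-') by a single pass that carries one Optional parity flag and never materialises the run.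
import Mathlib
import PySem

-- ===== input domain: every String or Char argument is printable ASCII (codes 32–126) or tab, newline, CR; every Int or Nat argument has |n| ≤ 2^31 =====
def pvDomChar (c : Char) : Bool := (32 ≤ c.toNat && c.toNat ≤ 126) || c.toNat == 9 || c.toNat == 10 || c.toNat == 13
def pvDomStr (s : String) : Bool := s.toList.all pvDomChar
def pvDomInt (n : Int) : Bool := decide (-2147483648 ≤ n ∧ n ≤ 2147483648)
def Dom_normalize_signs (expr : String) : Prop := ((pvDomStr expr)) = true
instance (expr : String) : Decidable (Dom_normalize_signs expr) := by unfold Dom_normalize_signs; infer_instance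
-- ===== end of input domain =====

-- B replaces A's nested sign-run collection loop by a single pass carrying one Optional parity flag (alternative decomposition, same cost).

-- ===== PORT A =====
-- inner while loop of A: collect the maximal leading run of '+'/'-' characters
def nsAInner : List Char → List Char × List Char
  | [] => ([], [])
  | c :: cs =>
    if c == '+' || c == '-' then
      let p := nsAInner cs
      (c :: p.1, p.2)
    else ([], c :: cs)

-- used only for the termination of the outer loop
theorem nsAInner_snd_le (l : List Char) : (nsAInner l).2.length ≤ l.length := by
  induction l with
  | nil => simp [nsAInner]
  | cons c cs ih =>
    by_cases h : (c == '+' || c == '-') = true <;> simp [nsAInner, h] <;> omega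

-- outer while loop of A over the remaining characters
def nsAOuter : List Char → List Char
  | [] => []
  | c :: cs =>
    if h : (c == '+' || c == '-') = true then
      let p := nsAInner (c :: cs)
      (if p.1.count '-' % 2 = 1 then '-' else '+') :: nsAOuter p.2
    else
      c :: nsAOuter cs
termination_by l => l.length
decreasing_by
  · simp [nsAInner, h]
    have := nsAInner_snd_le cs
    omega
  · simp

def normalize_signs (expr : String) : String := String.mk (nsAOuter expr.toList)

-- ===== PORT B =====
-- one step of B's single for-loop; state = (output so far, pending '-'-parity of the current sign run)
def nsBStep (st : List Char × Option Bool) (c : Char) : List Char × Option Bool :=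
  if c == '+' || c == '-' then
    (st.1, some (match st.2 with
                 | none => c == '-'
                 | some b => b != (c == '-')))
  else
    match st.2 with
    | none => (st.1 ++ [c], none)
    | some b => (st.1 ++ [if b then '-' else '+', c], none)

-- B's final flush of a pending sign run
def nsBFlush (st : List Char × Option Bool) : List Char :=
  match st.2 with
  | none => st.1
  | some b => st.1 ++ [if b then '-' else '+']

def normalize_signs_alt (expr : String) : String :=
  String.mk (nsBFlush (expr.toList.foldl nsBStep ([], none)))

-- ===== PRECONDITION & SPEC =====
def Spec_normalize_signs (expr : String) (out : String) : Prop := out = normalize_signs_alt expr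
instance (expr : String) (out : String) : Decidable (Spec_normalize_signs expr out) := by unfold Spec_normalize_signs; infer_instance

-- ===== CLAIM (what is proved, stated in full; the proofs are below) =====
def Claim_equal_normalize_signs : Prop := ∀ (expr : String), Dom_normalize_signs expr → Spec_normalize_signs expr (normalize_signs expr)

-- ===== LEMMAS AND PROOFS =====

-- a pending parity b behaves exactly like a sign character prepended to the rest of the input
theorem nsAOuter_sign_absorb (b : Bool) (c : Char) (cs : List Char)
    (hc : (c == '+' || c == '-') = true) :
    nsAOuter ((if b then '-' else '+') :: c :: cs)
      = nsAOuter ((if (b != (c == '-')) then '-' else '+') :: cs) := by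
  have hc' : c = '+' ∨ c = '-' := by
    rcases Bool.or_eq_true_iff.mp hc with h | h
    · exact Or.inl (by exact beq_iff_eq.mp h)
    · exact Or.inr (by exact beq_iff_eq.mp h)
  rcases hc' with rfl | rfl <;> cases b <;>
    simp [nsAOuter, nsAInner, List.count_cons] <;>
    (congr 1) <;>
    · congr 1
      omega

-- main invariant: B's fold from state (out, parity?) computes A's outer loop
theorem ns_invariant (l : List Char) :
    (∀ (out : List Char) (b : Bool),
        nsBFlush (l.foldl nsBStep (out, some b))
          = out ++ nsAOuter ((if b then '-' else '+') :: l)) ∧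
    (∀ (out : List Char),
        nsBFlush (l.foldl nsBStep (out, none)) = out ++ nsAOuter l) := by
  induction l with
  | nil =>
    constructor
    · intro out b
      cases b <;> simp [nsBFlush, nsAOuter, nsAInner]
    · intro out
      simp [nsBFlush, nsAOuter]
  | cons c cs ih =>
    obtain ⟨ih1, ih2⟩ := ih
    constructor
    · intro out b
      by_cases hc : (c == '+' || c == '-') = true
      · rw [nsAOuter_sign_absorb b c cs hc]
        simpa [nsBStep, hc] using ih1 out (b != (c == '-'))
      · have h2 := ih2 (out ++ [if b then '-' else '+', c])
        simp only [List.foldl_cons, nsBStep, hc, Bool.false_eq_true, if_false] at h2 ⊢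
        rw [h2]
        cases b <;>
          simp [nsAOuter, nsAInner, hc, List.count_cons, List.append_assoc]
    · intro out
      by_cases hc : (c == '+' || c == '-') = true
      · have h1 := ih1 out (c == '-')
        have hce : (if (c == '-') = true then '-' else '+') = c := by
          rcases Bool.or_eq_true_iff.mp hc with h | h
          · have : c = '+' := beq_iff_eq.mp h
            subst this; simp
          · have : c = '-' := beq_iff_eq.mp h
            subst this; simp
        rw [hce] at h1
        simpa [nsBStep, hc] using h1
      · have h2 := ih2 (out ++ [c])
        simp only [List.foldl_cons, nsBStep, hc, Bool.false_eq_true, if_false] at h2 ⊢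
        rw [h2]
        simp [nsAOuter, hc, List.append_assoc]

-- ===== VERDICT (by name: the statement is the Claim_ definition above) =====
theorem normalize_signs_spec : Claim_equal_normalize_signs := by
  intro expr _
  unfold Spec_normalize_signs normalize_signs normalize_signs_alt
  have h := (ns_invariant expr.toList).2 []
  rw [h]
  simp
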